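-- pv_equiv track=rewrite | github.com/bajajvinamr/HacktoberFest2020 | Python/PseudoRandomSeriesEncrypter.py | generateNxtNumber
-- ===== SOURCE A (Python) =====
-- def generateNxtNumber(seed):
--     seed = int(seed)
--     if seed == 0 or seed == 1:
--         seed = seed + 2
--     new_num = seed * seed
--     string_num = str(new_num)
--     if len(string_num) > 4:
--         while len(string_num) <= 8:
--             string_num = '0' + string_num
--         final_num = string_num[2:6]  # 01 2345 67
--     else:
--         while len(string_num) != 4:
--             string_num = '0' + string_num
--         final_num = string_num
--     return final_num
-- ===== SOURCE B (Python) =====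
-- def generateNxtNumber(seed):
--     seed = int(seed)
--     if seed == 0 or seed == 1:
--         seed = seed + 2
--     sq = seed * seed
--     n_digits = len(str(sq))
--     if n_digits <= 4:
--         return str(sq).zfill(4)
--     shift = max(9, n_digits) - 6
--     return str((sq // 10 ** shift) % 10000).zfill(4)
-- ===== Notes on version B (the rewrite author's own statement) =====
-- stated objective: simpler
-- what changed: B replaces A's two pad-with-zeros while-loops and the string slice by arithmetic: it extracts the middle four digits of the square with one integer floor-division and one modulus by powers of ten (shift chosen from the digit count), then zero-pads once with zfill.
import Mathlib
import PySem

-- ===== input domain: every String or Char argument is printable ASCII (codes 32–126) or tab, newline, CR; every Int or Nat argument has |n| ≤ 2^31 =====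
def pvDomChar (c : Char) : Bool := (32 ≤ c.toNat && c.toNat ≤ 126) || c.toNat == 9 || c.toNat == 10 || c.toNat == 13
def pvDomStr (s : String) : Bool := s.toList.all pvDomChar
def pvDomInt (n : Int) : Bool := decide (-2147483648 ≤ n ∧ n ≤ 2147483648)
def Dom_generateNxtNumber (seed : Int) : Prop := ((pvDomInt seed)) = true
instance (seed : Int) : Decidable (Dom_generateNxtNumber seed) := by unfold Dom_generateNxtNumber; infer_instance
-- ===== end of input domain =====

-- B replaces A's pad-with-zeros while-loops and string slice by arithmetic extraction of the
-- middle four digits (// and % by powers of 10) plus zfill — simpler, no measured speed claim.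


-- ===== PORT A =====
-- A's `while len(string_num) <= 8: string_num = '0' + string_num`
def pvPadTo9 (s : List Char) : List Char :=
  if s.length ≤ 8 then pvPadTo9 ('0' :: s) else s
termination_by 9 - s.length
decreasing_by simp; omega

-- A's `while len(string_num) != 4: string_num = '0' + string_num`; it only runs with
-- len ≤ 4 (the else-branch), where `≠ 4` is the same test as `< 4` (written so for totality).
def pvPadTo4 (s : List Char) : List Char :=
  if s.length < 4 then pvPadTo4 ('0' :: s) else s
termination_by 4 - s.length
decreasing_by simp; omega

def generateNxtNumber (seed : Int) : String :=
  -- seed = int(seed) is the identity on an int argument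
  let seed := if seed == 0 || seed == 1 then seed + 2 else seed
  let new_num := seed * seed
  let string_num := PySem.Int.toChars new_num
  if string_num.length > 4 then
    String.ofList (PySem.List.slice (pvPadTo9 string_num) (some 2) (some 6))
  else
    String.ofList (pvPadTo4 string_num)

-- ===== PORT B =====
def generateNxtNumber_alt (seed : Int) : String :=
  let seed := if seed == 0 || seed == 1 then seed + 2 else seed
  let sq := seed * seed
  let nDigits := PySem.Str.len (PySem.Int.toStr sq)
  if nDigits ≤ 4 then
    PySem.Str.zfill (PySem.Int.toStr sq) 4
  else
    -- shift = max(9, n_digits) - 6 ≥ 3, so `.toNat` in the exponent is exact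
    let shift := max 9 nDigits - 6
    PySem.Str.zfill (PySem.Int.toStr (PySem.Int.mod (PySem.Int.floordiv sq (10 ^ shift.toNat)) 10000)) 4

-- ===== PRECONDITION & SPEC =====
def Spec_generateNxtNumber (seed : Int) (out : String) : Prop := out = generateNxtNumber_alt seed
instance (seed : Int) (out : String) : Decidable (Spec_generateNxtNumber seed out) := by unfold Spec_generateNxtNumber; infer_instance

-- ===== CLAIM (what is proved, stated in full; the proofs are below) =====
def Claim_equal_generateNxtNumber : Prop := ∀ (seed : Int), Dom_generateNxtNumber seed → Spec_generateNxtNumber seed (generateNxtNumber seed)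

-- ===== LEMMAS AND PROOFS =====

-- `pvG k n`: the last k decimal digits of n, most significant first, zero-padded to width k.
def pvG : Nat → Nat → List Char
  | 0, _ => []
  | k+1, n => pvG k (n / 10) ++ [Nat.digitChar (n % 10)]

-- number of decimal digits of n (1 for n = 0)
def pvLen (n : Nat) : Nat := Nat.log 10 n + 1

theorem pvG_length (k n : Nat) : (pvG k n).length = k := by
  induction k generalizing n with
  | zero => rfl
  | succ k ih => simp [pvG, ih]

theorem pvG_zero (j : Nat) : pvG j 0 = List.replicate j '0' := by
  induction j with
  | zero => rfl
  | succ j ih =>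
    show pvG j 0 ++ [Nat.digitChar 0] = _
    rw [ih, List.replicate_succ' (n := j)]
    rfl

theorem pvG_split (k j n : Nat) : pvG (j + k) n = pvG j (n / 10 ^ k) ++ pvG k (n % 10 ^ k) := by
  induction k generalizing n with
  | zero => simp [pvG]
  | succ k ih =>
    have h1 : n / 10 / 10 ^ k = n / 10 ^ (k + 1) := by
      rw [Nat.div_div_eq_div_mul, pow_succ']
    have h2 : n / 10 % 10 ^ k = n % 10 ^ (k + 1) / 10 := by
      rw [pow_succ', Nat.mod_mul_right_div_self]
    have h3 : n % 10 = n % 10 ^ (k + 1) % 10 := by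
      rw [Nat.mod_mod_of_dvd]
      exact dvd_pow_self 10 (Nat.succ_ne_zero k)
    show pvG (j + k) (n / 10) ++ [Nat.digitChar (n % 10)] = _
    rw [ih, h1, h2, h3]
    simp [pvG]

theorem pvG_of_lt (j k n : Nat) (h : n < 10 ^ k) :
    pvG (j + k) n = List.replicate j '0' ++ pvG k n := by
  rw [pvG_split, Nat.div_eq_of_lt h, Nat.mod_eq_of_lt h, pvG_zero]

theorem pvG_pad (k m n : Nat) (hm : m = pvLen n) (hk : m ≤ k) (h : n < 10 ^ m) :
    pvG k n = List.replicate (k - m) '0' ++ pvG m n := by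
  have := pvG_of_lt (k - m) m n h
  rw [← this]
  congr 1
  omega

theorem pvLen_pos (n : Nat) : 1 ≤ pvLen n := Nat.le_add_left 1 _

theorem lt_pow_pvLen (n : Nat) : n < 10 ^ pvLen n :=
  Nat.lt_pow_succ_log_self (by norm_num) n

theorem pvLen_le_of_lt (n k : Nat) (hk : 1 ≤ k) (h : n < 10 ^ k) : pvLen n ≤ k := by
  rcases Nat.eq_zero_or_pos n with rfl | hn
  · simpa [pvLen] using hk
  · by_contra hlt
    have h10 : 10 ^ k ≤ n :=
      (Nat.le_log_iff_pow_le (by norm_num) (by omega : n ≠ 0)).mp (by unfold pvLen at hlt; omega)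
    omega

theorem lt_of_pvLen_le (n k : Nat) (h : pvLen n ≤ k) : n < 10 ^ k :=
  lt_of_lt_of_le (lt_pow_pvLen n) (Nat.pow_le_pow_right (by norm_num) h)

theorem toDigitsCore_eq (fuel n : Nat) (acc : List Char) (h : n < fuel) :
    Nat.toDigitsCore 10 fuel n acc = pvG (pvLen n) n ++ acc := by
  induction fuel generalizing n acc with
  | zero => omega
  | succ fuel ih =>
    simp only [Nat.toDigitsCore]
    by_cases h10 : n / 10 = 0
    · have hn : n < 10 := by rcases Nat.div_eq_zero_iff.mp h10 with h' | h' <;> omega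
      have hlog : Nat.log 10 n = 0 := Nat.log_eq_zero_iff.mpr (Or.inl hn)
      have hlen1 : pvLen n = 1 := by unfold pvLen; omega
      rw [if_pos h10, hlen1]
      show _ = (pvG 0 (n / 10) ++ [Nat.digitChar (n % 10)]) ++ acc
      rw [Nat.mod_eq_of_lt hn]
      rfl
    · have hn : 10 ≤ n := by
        by_contra hc
        exact h10 (Nat.div_eq_of_lt (by omega))
      have hfuel : n / 10 < fuel := by
        have := Nat.div_lt_self (by omega : 0 < n) (by norm_num : 1 < 10)
        omega
      have hlog : Nat.log 10 n = Nat.log 10 (n / 10) + 1 := by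
        have h1 := Nat.log_div_base 10 n
        have h2 : 0 < Nat.log 10 n := Nat.log_pos (by norm_num) hn
        omega
      rw [if_neg h10, ih _ _ hfuel]
      have hst : pvLen n = pvLen (n / 10) + 1 := by unfold pvLen; omega
      rw [hst]
      show _ = (pvG (pvLen (n / 10)) (n / 10) ++ [Nat.digitChar (n % 10)]) ++ acc
      simp

theorem toDigits_eq_pvG (n : Nat) : Nat.toDigits 10 n = pvG (pvLen n) n := by
  rw [show Nat.toDigits 10 n = Nat.toDigitsCore 10 (n + 1) n [] from rfl,
      toDigitsCore_eq (n + 1) n [] (Nat.lt_succ_self n), List.append_nil]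

theorem toChars_natCast (m : Nat) : PySem.Int.toChars (m : Int) = pvG (pvLen m) m := by
  unfold PySem.Int.toChars
  rw [if_neg (by omega)]
  simp [toDigits_eq_pvG]

theorem digitChar_not_sign (d : Nat) : ¬(Nat.digitChar d = '+' ∨ Nat.digitChar d = '-') := by
  rcases d with _|_|_|_|_|_|_|_|_|_|_|_|_|_|_|_|d <;> simp [Nat.digitChar]

theorem pvG_ne_nil (k n : Nat) (hk : 1 ≤ k) : pvG k n ≠ [] := by
  cases k with
  | zero => omega
  | succ k => simp [pvG]

theorem pvG_head_not_sign (k n : Nat) :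
    ∀ c ∈ pvG k n, ¬(c = '+' ∨ c = '-') := by
  induction k generalizing n with
  | zero => simp [pvG]
  | succ k ih =>
    intro c hc
    simp only [pvG, List.mem_append, List.mem_singleton] at hc
    rcases hc with hc | rfl
    · exact ih _ c hc
    · exact digitChar_not_sign _

theorem zfill_cons (c : Char) (rest : List Char) (w : Int) :
    PySem.Chars.zfill (c :: rest) w =
      if w ≤ ((c :: rest).length : Int) then c :: rest
      else if c = '+' ∨ c = '-' then c :: (List.replicate (w.toNat - (c :: rest).length) '0' ++ rest)
      else List.replicate (w.toNat - (c :: rest).length) '0' ++ c :: rest := by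
  rfl

-- zfill to width 4 of str(n), for n < 10^4
theorem zfill4_pvG (n : Nat) (h : n < 10 ^ 4) :
    PySem.Chars.zfill (pvG (pvLen n) n) 4 = pvG 4 n := by
  have hle : pvLen n ≤ 4 := pvLen_le_of_lt n 4 (by norm_num) h
  rcases hcs : pvG (pvLen n) n with _ | ⟨c, rest⟩
  · exact absurd hcs (pvG_ne_nil _ _ (pvLen_pos n))
  have hlen : (c :: rest).length = pvLen n := by rw [← hcs, pvG_length]
  rw [zfill_cons]
  by_cases h44 : pvLen n = 4
  · rw [if_pos (by rw [hlen, h44]; norm_num), ← hcs, h44]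
  · have hns := pvG_head_not_sign (pvLen n) n c (hcs ▸ List.mem_cons_self)
    rw [if_neg (by rw [hlen]; omega), if_neg hns, hlen,
        pvG_pad 4 (pvLen n) n rfl hle (lt_pow_pvLen n), ← hcs]
    norm_num
    omega

theorem pvPadTo9_eq (s : List Char) : pvPadTo9 s = List.replicate (9 - s.length) '0' ++ s := by
  by_cases h : s.length ≤ 8
  · rw [pvPadTo9, if_pos h, pvPadTo9_eq ('0' :: s)]
    have h9 : 9 - s.length = (9 - ('0' :: s).length) + 1 := by simp; omega
    rw [h9, List.replicate_succ']
    simp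
  · rw [pvPadTo9, if_neg h]
    have h9 : 9 - s.length = 0 := by omega
    simp [h9]
termination_by 9 - s.length
decreasing_by simp; omega

theorem pvPadTo4_eq (s : List Char) : pvPadTo4 s = List.replicate (4 - s.length) '0' ++ s := by
  by_cases h : s.length < 4
  · rw [pvPadTo4, if_pos h, pvPadTo4_eq ('0' :: s)]
    have h4 : 4 - s.length = (4 - ('0' :: s).length) + 1 := by simp; omega
    rw [h4, List.replicate_succ']
    simp
  · rw [pvPadTo4, if_neg h]
    have h4 : 4 - s.length = 0 := by omega
    simp [h4]
termination_by 4 - s.length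
decreasing_by simp; omega

-- the slice xs[2:6] on a list of length ≥ 6
theorem slice_two_six (xs : List Char) (h : 6 ≤ xs.length) :
    PySem.List.slice xs (some 2) (some 6) = (xs.drop 2).take 4 := by
  show List.take (PySem.List.clampIdx xs.length 6 - PySem.List.clampIdx xs.length 2)
        (List.drop (PySem.List.clampIdx xs.length 2) xs) = _
  unfold PySem.List.clampIdx
  rw [if_neg (by omega), if_neg (by omega)]
  have h2 : min (Int.toNat 2) xs.length = 2 := by simp; omega
  have h6 : min (Int.toNat 6) xs.length = 6 := by simp; omega
  rw [h2, h6]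

-- slicing [2:6] out of the width-m zero-padded digits takes digits 10^(m-3)..10^(m-6)
theorem slice_pvG (m n : Nat) (hm : 9 ≤ m) :
    PySem.List.slice (pvG m n) (some 2) (some 6) = pvG 4 (n % 10 ^ (m - 2) / 10 ^ (m - 6)) := by
  rw [slice_two_six _ (by rw [pvG_length]; omega)]
  have e1 : pvG m n = pvG 2 (n / 10 ^ (m - 2)) ++ pvG (m - 2) (n % 10 ^ (m - 2)) := by
    have := pvG_split (m - 2) 2 n
    rw [show 2 + (m - 2) = m by omega] at this
    exact this
  have e2 : pvG (m - 2) (n % 10 ^ (m - 2))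
      = pvG 4 (n % 10 ^ (m - 2) / 10 ^ (m - 6)) ++ pvG (m - 6) (n % 10 ^ (m - 2) % 10 ^ (m - 6)) := by
    have := pvG_split (m - 6) 4 (n % 10 ^ (m - 2))
    rw [show 4 + (m - 6) = m - 2 by omega] at this
    exact this
  have d1 : List.drop 2 (pvG 2 (n / 10 ^ (m - 2)) ++ pvG (m - 2) (n % 10 ^ (m - 2)))
      = pvG (m - 2) (n % 10 ^ (m - 2)) := by
    have := List.drop_left (l₁ := pvG 2 (n / 10 ^ (m - 2))) (l₂ := pvG (m - 2) (n % 10 ^ (m - 2)))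
    rwa [pvG_length] at this
  have t1 : List.take 4 (pvG 4 (n % 10 ^ (m - 2) / 10 ^ (m - 6))
        ++ pvG (m - 6) (n % 10 ^ (m - 2) % 10 ^ (m - 6)))
      = pvG 4 (n % 10 ^ (m - 2) / 10 ^ (m - 6)) := by
    have := List.take_left (l₁ := pvG 4 (n % 10 ^ (m - 2) / 10 ^ (m - 6)))
      (l₂ := pvG (m - 6) (n % 10 ^ (m - 2) % 10 ^ (m - 6)))
    rwa [pvG_length] at this
  rw [e1, d1, e2, t1]

-- A's middle-four-digit slice equals B's arithmetic extraction, char-list level, 5 ≤ L ≤ 9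
theorem key_mid (n : Nat) (h9 : pvLen n ≤ 9) :
    PySem.List.slice (pvPadTo9 (pvG (pvLen n) n)) (some 2) (some 6)
      = PySem.Chars.zfill (pvG (pvLen (n / 10 ^ 3 % 10000)) (n / 10 ^ 3 % 10000)) 4 := by
  have hpad : pvPadTo9 (pvG (pvLen n) n) = pvG 9 n := by
    rw [pvPadTo9_eq, pvG_length, ← pvG_pad 9 (pvLen n) n rfl h9 (lt_pow_pvLen n)]
  have hmod : n % 10 ^ 7 / 10 ^ 3 = n / 10 ^ 3 % 10000 := by
    rw [show (10 : Nat) ^ 7 = 10 ^ 3 * 10 ^ 4 by norm_num, Nat.mod_mul_right_div_self]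
    norm_num
  rw [hpad, slice_pvG 9 n (by norm_num),
      zfill4_pvG _ (by have := Nat.mod_lt (n / 10 ^ 3) (show 0 < 10000 by norm_num); omega)]
  exact congrArg (pvG 4) (by norm_num at hmod ⊢; omega)

-- same, 9 < L  (no padding happens; shift = L - 6)
theorem key_hi (n : Nat) (h9 : 9 < pvLen n) :
    PySem.List.slice (pvPadTo9 (pvG (pvLen n) n)) (some 2) (some 6)
      = PySem.Chars.zfill (pvG (pvLen (n / 10 ^ (pvLen n - 6) % 10000))
          (n / 10 ^ (pvLen n - 6) % 10000)) 4 := by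
  have hpad : pvPadTo9 (pvG (pvLen n) n) = pvG (pvLen n) n := by
    rw [pvPadTo9_eq, pvG_length, show 9 - pvLen n = 0 by omega]
    rfl
  have hmod : n % 10 ^ (pvLen n - 2) / 10 ^ (pvLen n - 6) = n / 10 ^ (pvLen n - 6) % 10000 := by
    rw [show (10 : Nat) ^ (pvLen n - 2) = 10 ^ (pvLen n - 6) * 10 ^ 4 by
          rw [← pow_add]; congr 1; omega,
        Nat.mod_mul_right_div_self]
    norm_num
  rw [hpad, slice_pvG (pvLen n) n (by omega), hmod,
      zfill4_pvG _ (by have := Nat.mod_lt (n / 10 ^ (pvLen n - 6)) (show 0 < 10000 by norm_num); omega)]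

-- A's pad-to-4 equals B's zfill, char-list level, L ≤ 4
theorem key_lo (n : Nat) (h4 : pvLen n ≤ 4) :
    pvPadTo4 (pvG (pvLen n) n) = PySem.Chars.zfill (pvG (pvLen n) n) 4 := by
  rw [pvPadTo4_eq, pvG_length, zfill4_pvG n (lt_of_pvLen_le n 4 h4),
      ← pvG_pad 4 (pvLen n) n rfl h4 (lt_pow_pvLen n)]

-- B's floordiv/mod arithmetic, over the nonnegative square, lands in Nat
theorem fdiv_fmod_natCast (n k : Nat) :
    PySem.Int.mod (PySem.Int.floordiv (n : Int) ((10 : Int) ^ k)) 10000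
      = ((n / 10 ^ k % 10000 : Nat) : Int) := by
  unfold PySem.Int.mod PySem.Int.floordiv
  have h1 : (n : Int).fdiv ((10 : Int) ^ k) = ((n / 10 ^ k : Nat) : Int) := by
    rw [Int.fdiv_eq_ediv, if_pos (Or.inl (by positivity))]
    push_cast
    simp
  rw [h1, Int.fmod_eq_emod, if_pos (Or.inl (by norm_num))]
  push_cast
  simp

-- ===== VERDICT (by name: the statement is the Claim_ definition above) =====
theorem generateNxtNumber_spec : Claim_equal_generateNxtNumber := by
  intro seed _
  unfold Spec_generateNxtNumber generateNxtNumber generateNxtNumber_alt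
  set t := if seed == 0 || seed == 1 then seed + 2 else seed with ht
  obtain ⟨n, hn⟩ : ∃ n : Nat, t * t = (n : Int) :=
    Int.eq_ofNat_of_zero_le (mul_self_nonneg t)
  simp only [hn, PySem.Str.len, PySem.Int.toStr, String.toList_ofList, toChars_natCast,
    pvG_length, fdiv_fmod_natCast]
  by_cases h4 : pvLen n ≤ 4
  · rw [if_neg (by omega), if_pos (by exact_mod_cast h4)]
    apply String.toList_inj.mp
    rw [String.toList_ofList, PySem.Str.toList_zfill, String.toList_ofList]
    exact key_lo n h4
  · rw [if_pos (by omega), if_neg (by omega)]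
    apply String.toList_inj.mp
    rw [String.toList_ofList, PySem.Str.toList_zfill, String.toList_ofList]
    by_cases h9 : pvLen n ≤ 9
    · have hmax : (max 9 ((pvLen n : Nat) : Int) - 6).toNat = 3 := by
        rw [show max 9 ((pvLen n : Nat) : Int) = 9 by omega]
        rfl
      rw [hmax]
      exact key_mid n h9
    · have hmax : (max 9 ((pvLen n : Nat) : Int) - 6).toNat = pvLen n - 6 := by
        rw [show max 9 ((pvLen n : Nat) : Int) = (pvLen n : Int) by omega]
        omega
      rw [hmax]
      exact key_hi n (by omega)
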